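-- pv_equiv track=rewrite | github.com/rrwt/daily-coding-challenge | daily_problems/problem_101_to_200/problem_114.py | reverse_words_keeping_delimiters
-- ===== SOURCE A (Python) =====
-- def reverse_words_keeping_delimiters(text: str) -> str:
--     delimiters = []
--     text = list(text)
--
--     for index, char in enumerate(text):  # mutate
--         if char in ("/", ":"):
--             delimiters.append(char)
--             text[index] = " "
--
--     text = "".join(text).split(" ")
--     start = 0
--     end = len(text) - 1
--
--     while start < end:
--         if text[start] == "":
--             start += 1
--         elif text[end] == "":
--             end -= 1
--         else:
--             text[start], text[end] = text[end], text[start]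
--             start += 1
--             end -= 1
--
--     text = list(" ".join(text))
--
--     ind_delimiters = 0
--
--     for index, char in enumerate(text):
--         if char == " ":
--             text[index] = delimiters[ind_delimiters]
--             ind_delimiters += 1
--
--     return "".join(text)
-- ===== SOURCE B (Python) =====
-- def reverse_words_keeping_delimiters(text: str) -> str:
--     # Tokenize once: split directly at '/' and ':', remembering the delimiters in order.
--     delimiters = [c for c in text if c in "/:"]
--     tokens = [[]]
--     for c in text:
--         if c in "/:":
--             tokens.append([])
--         else:
--             tokens[-1].append(c)
--     tokens = ["".join(t) for t in tokens]
--     # Reverse the non-empty tokens, keeping empty slots in their original positions.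
--     words = iter([t for t in tokens if t][::-1])
--     slots = [next(words) if t else "" for t in tokens]
--     # Reassemble, re-inserting the original delimiters between the slots.
--     out = [slots[0]]
--     for d, t in zip(delimiters, slots[1:]):
--         out.append(d)
--         out.append(t)
--     return "".join(out)
-- ===== Notes on version B (the rewrite author's own statement) =====
-- stated objective: alternative
-- what changed: B tokenizes the text once directly at '/' and ':' (recording the delimiters), reverses the non-empty tokens in one filtered-reverse pass keeping empty slots fixed, and splices tokens and delimiters back together, replacing A's five-phase pipeline (mutate chars to spaces, split on space, two-pointer in-place swap loop, join on spaces, second positional replacement pass).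
import Mathlib
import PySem

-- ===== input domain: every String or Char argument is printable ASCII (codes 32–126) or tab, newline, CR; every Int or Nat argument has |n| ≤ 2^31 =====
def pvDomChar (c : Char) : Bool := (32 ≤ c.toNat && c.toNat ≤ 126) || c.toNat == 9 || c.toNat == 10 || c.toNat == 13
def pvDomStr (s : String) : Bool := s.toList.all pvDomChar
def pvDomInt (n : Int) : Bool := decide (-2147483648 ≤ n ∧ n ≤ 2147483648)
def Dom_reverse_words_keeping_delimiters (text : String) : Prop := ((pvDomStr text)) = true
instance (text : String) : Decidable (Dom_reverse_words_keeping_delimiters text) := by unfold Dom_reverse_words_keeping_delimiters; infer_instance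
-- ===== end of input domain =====

-- B reverses the words in one structural pass (tokenize at '/'/':' once, reverse the
-- non-empty tokens keeping empty slots fixed, reassemble with the recorded delimiters)
-- instead of A's mutate-to-space / split / two-pointer swap / join / second replacement pass.

def pvDelim (c : Char) : Bool := c == '/' || c == ':'

-- ===== PORT A =====
-- the enumerate-loop of A: collect delimiters, replace them by ' '
def pvAScan (st : List Char × List Char) (c : Char) : List Char × List Char :=
  if pvDelim c then (st.1 ++ [c], st.2 ++ [' ']) else (st.1, st.2 ++ [c])

-- A's while-loop: two-pointer swap of non-empty entries (indices always in range on A's inputs)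
def pvSwapLoop (l : List (List Char)) (s e : Nat) : List (List Char) :=
  if s < e then
    if l.getD s [] = [] then pvSwapLoop l (s + 1) e
    else if l.getD e [] = [] then pvSwapLoop l s (e - 1)
    else pvSwapLoop ((l.set s (l.getD e [])).set e (l.getD s [])) (s + 1) (e - 1)
  else l
termination_by e - s
decreasing_by all_goals omega

-- A's final enumerate loop: replace the i-th ' ' by delimiters[i]
-- (getD where Python indexes: out-of-range = Python's IndexError, excluded by Pre_)
def pvAReplace (ds : List Char) : List Char → Nat → List Char
  | [], _ => []
  | c :: rest, i =>
      if c = ' ' then ds.getD i ' ' :: pvAReplace ds rest (i + 1)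
      else c :: pvAReplace ds rest i

def reverse_words_keeping_delimiters (text : String) : String :=
  let st := text.toList.foldl pvAScan ([], [])
  let toks := PySem.Chars.splitOn st.2 [' ']
  let toks2 := pvSwapLoop toks 0 (toks.length - 1)
  String.ofList (pvAReplace st.1 (PySem.Chars.join [' '] toks2) 0)

-- ===== PORT B =====
-- Source B's tokenizing loop: state = (finished tokens, token being grown)
def pvBTok (st : List (List Char) × List Char) (c : Char) : List (List Char) × List Char :=
  if pvDelim c then (st.1 ++ [st.2], []) else (st.1, st.2 ++ [c])

-- Source B's comprehension [next(words) if t else "" for t in tokens]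
def pvAssign : List (List Char) → List (List Char) → List (List Char)
  | _, [] => []
  | ws, t :: ts => if t = [] then [] :: pvAssign ws ts else ws.headD [] :: pvAssign ws.tail ts

def reverse_words_keeping_delimiters_alt (text : String) : String :=
  let cs := text.toList
  let delims := cs.filter pvDelim
  let st := cs.foldl pvBTok ([], [])
  let tokens := st.1 ++ [st.2]
  let slots := pvAssign ((tokens.filter (· ≠ [])).reverse) tokens
  String.ofList ((delims.zip (slots.drop 1)).foldl (fun acc dt => acc ++ dt.1 :: dt.2) (slots.headD []))

-- ===== PRECONDITION & SPEC =====
-- Pre_ excludes texts containing a space: there A's delimiter count falls short of the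
-- gaps its space-split creates and A raises IndexError (it never returns).
def Pre_reverse_words_keeping_delimiters (text : String) : Prop := ' ' ∉ text.toList
instance (text : String) : Decidable (Pre_reverse_words_keeping_delimiters text) := by
  unfold Pre_reverse_words_keeping_delimiters; infer_instance

def pvWitness_reverse_words_keeping_delimiters : String := "ab/cd:e"

def Spec_reverse_words_keeping_delimiters (text : String) (out : String) : Prop :=
  out = reverse_words_keeping_delimiters_alt text
instance (text : String) (out : String) : Decidable (Spec_reverse_words_keeping_delimiters text out) := by
  unfold Spec_reverse_words_keeping_delimiters; infer_instance

-- ===== CLAIM (what is proved, stated in full; the proofs are below) =====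
def Claim_equal_reverse_words_keeping_delimiters : Prop :=
  ∀ (text : String), Dom_reverse_words_keeping_delimiters text →
    Pre_reverse_words_keeping_delimiters text →
    Spec_reverse_words_keeping_delimiters text (reverse_words_keeping_delimiters text)

-- ===== LEMMAS AND PROOFS =====

-- proof-side vocabulary
def pvRepl (c : Char) : Char := if pvDelim c then ' ' else c

def pvSplit (p : Char → Bool) : List Char → List (List Char)
  | [] => [[]]
  | c :: rest =>
      if p c then [] :: pvSplit p rest
      else match pvSplit p rest with
        | [] => [[c]]
        | t :: ts => (c :: t) :: ts

def pvConsCur (C : List Char) (ts : List (List Char)) : List (List Char) :=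
  match ts with
  | [] => [C]
  | t :: ts => (C ++ t) :: ts

def pvRevNE (m : List (List Char)) : List (List Char) :=
  pvAssign ((m.filter (· ≠ [])).reverse) m

def pvInterZ : List Char → List (List Char) → List Char
  | d :: ds, t :: ts => d :: (t ++ pvInterZ ds ts)
  | _, _ => []

lemma pvScan_eq (cs : List Char) (d a : List Char) :
    List.foldl pvAScan (d, a) cs = (d ++ cs.filter pvDelim, a ++ cs.map pvRepl) := by
  induction cs generalizing d a with
  | nil => simp
  | cons c cs ih =>
    simp only [List.foldl_cons, List.filter_cons, List.map_cons, pvAScan, pvRepl]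
    by_cases h : pvDelim c <;> simp [h, ih]

lemma pvSplit_ne_nil (p : Char → Bool) (cs : List Char) : pvSplit p cs ≠ [] := by
  cases cs with
  | nil => simp [pvSplit]
  | cons c rest =>
    simp only [pvSplit]
    split
    · simp
    · split <;> simp

lemma pvConsCur_nil (ts : List (List Char)) (h : ts ≠ []) : pvConsCur [] ts = ts := by
  cases ts with
  | nil => exact absurd rfl h
  | cons t ts => simp [pvConsCur]

lemma pvGo_spec (fuel : Nat) (l cur : List Char) (acc : List (List Char)) (h : l.length < fuel) :
    PySem.Chars.splitOn.go [' '] fuel l cur acc =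
      acc.reverse ++ pvConsCur cur.reverse (pvSplit (· == ' ') l) := by
  induction fuel generalizing l cur acc with
  | zero => omega
  | succ fuel ih =>
    cases l with
    | nil =>
      rw [PySem.Chars.splitOn.go]
      · simp [pvSplit, pvConsCur]
      · omega
    | cons c rest =>
      have hstep : PySem.Chars.splitOn.go [' '] (fuel + 1) (c :: rest) cur acc =
          if [' '].isPrefixOf (c :: rest) = true then
            PySem.Chars.splitOn.go [' '] fuel (List.drop 1 (c :: rest)) [] (cur.reverse :: acc)
          else PySem.Chars.splitOn.go [' '] fuel rest (c :: cur) acc := by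
        (rw [PySem.Chars.splitOn.go]; simp)
      have hrest : rest.length < fuel := by simpa using Nat.lt_of_succ_lt_succ h
      rw [hstep]
      by_cases hc : c = ' '
      · have hpre : [' '].isPrefixOf (c :: rest) = true := by simp [List.isPrefixOf, hc]
        rw [if_pos hpre, List.drop_one, List.tail_cons, ih rest [] _ hrest]
        rw [List.reverse_nil, pvConsCur_nil _ (pvSplit_ne_nil _ _)]
        simp [pvSplit, hc, pvConsCur]
      · have hpre : ¬ ([' '].isPrefixOf (c :: rest) = true) := by simp [List.isPrefixOf]; exact fun h' => hc h'.symm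
        rw [if_neg hpre, ih rest (c :: cur) acc hrest]
        have hc' : (c == ' ') = false := by simpa using hc
        simp only [pvSplit, hc']
        rcases hs : pvSplit (· == ' ') rest with _ | ⟨t, ts⟩
        · exact absurd hs (pvSplit_ne_nil _ _)
        · simp [pvConsCur]

lemma pvSplitOn_eq (cs : List Char) :
    PySem.Chars.splitOn cs [' '] = pvSplit (· == ' ') cs := by
  rw [PySem.Chars.splitOn, pvGo_spec _ _ _ _ (by omega)]
  simp [pvConsCur_nil _ (pvSplit_ne_nil _ _)]

lemma pvSplit_map_repl (cs : List Char) (h : ' ' ∉ cs) :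
    pvSplit (· == ' ') (cs.map pvRepl) = pvSplit pvDelim cs := by
  induction cs with
  | nil => rfl
  | cons c rest ih =>
    have hc : c ≠ ' ' := fun hc => h (hc ▸ List.mem_cons_self)
    have ih' := ih (fun hm => h (List.mem_cons_of_mem _ hm))
    simp only [List.map_cons, pvSplit, pvRepl]
    by_cases hd : pvDelim c
    · simp [hd, ih']
    · simp only [hd]
      have : (c == ' ') = false := by simpa using hc
      simp [this, ih']

lemma pvTok_eq (cs : List Char) (D : List (List Char)) (C : List Char) :
    (List.foldl pvBTok (D, C) cs).1 ++ [(List.foldl pvBTok (D, C) cs).2] =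
      D ++ pvConsCur C (pvSplit pvDelim cs) := by
  induction cs generalizing D C with
  | nil => simp [pvConsCur, pvSplit]
  | cons c rest ih =>
    simp only [List.foldl_cons, pvBTok, pvSplit]
    by_cases hd : pvDelim c
    · simp only [hd, if_true]
      rw [ih]
      rw [pvConsCur_nil _ (pvSplit_ne_nil _ _)]
      simp [pvConsCur]
    · simp only [hd]
      rw [ih]
      rcases hs : pvSplit pvDelim rest with _ | ⟨t, ts⟩
      · exact absurd hs (pvSplit_ne_nil _ _)
      · simp [pvConsCur]

lemma pvSplit_length (p : Char → Bool) (cs : List Char) :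
    (pvSplit p cs).length = (cs.filter p).length + 1 := by
  induction cs with
  | nil => simp [pvSplit]
  | cons c rest ih =>
    simp only [pvSplit, List.filter_cons]
    by_cases h : p c
    · simp [h, ih]
    · rcases hs : pvSplit p rest with _ | ⟨t, ts⟩
      · exact absurd hs (pvSplit_ne_nil p rest)
      · simp only [h]
        simpa [hs] using ih

lemma pvSplit_mem (p : Char → Bool) (cs : List Char) :
    ∀ t ∈ pvSplit p cs, ∀ x ∈ t, x ∈ cs := by
  induction cs with
  | nil => intro t ht x hx; simp [pvSplit] at ht; simp [ht] at hx
  | cons c rest ih =>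
    intro t ht x hx
    simp only [pvSplit] at ht
    split at ht
    · rcases List.mem_cons.1 ht with rfl | h'
      · simp at hx
      · exact List.mem_cons_of_mem _ (ih t h' x hx)
    · rcases hs : pvSplit p rest with _ | ⟨u, us⟩
      · exact absurd hs (pvSplit_ne_nil p rest)
      · rw [hs] at ht
        rcases List.mem_cons.1 ht with rfl | h'
        · rcases List.mem_cons.1 hx with rfl | h''
          · exact List.mem_cons_self
          · exact List.mem_cons_of_mem _ (ih u (hs ▸ List.mem_cons_self) x h'')
        · exact List.mem_cons_of_mem _ (ih t (hs ▸ List.mem_cons_of_mem _ h') x hx)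

lemma pvAssign_length (ws m : List (List Char)) : (pvAssign ws m).length = m.length := by
  induction m generalizing ws with
  | nil => simp [pvAssign]
  | cons t ts ih => simp only [pvAssign]; split <;> simp [ih]

lemma pvAssign_mem (ws m : List (List Char)) (t : List Char) (h : t ∈ pvAssign ws m) :
    t = [] ∨ t ∈ ws := by
  induction m generalizing ws with
  | nil => simp [pvAssign] at h
  | cons u us ih =>
    simp only [pvAssign] at h
    split at h
    · rcases List.mem_cons.1 h with h' | h'
      · exact Or.inl h'
      · exact ih ws h'
    · rcases List.mem_cons.1 h with h' | h'
      · cases ws with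
        | nil => exact Or.inl (h' ▸ rfl)
        | cons w ws' => exact Or.inr (h' ▸ List.mem_cons_self)
      · rcases ih ws.tail h' with h'' | h''
        · exact Or.inl h''
        · exact Or.inr (List.mem_of_mem_tail h'')

lemma pvAssign_snoc_nil (ws m : List (List Char)) :
    pvAssign ws (m ++ [[]]) = pvAssign ws m ++ [[]] := by
  induction m generalizing ws with
  | nil => simp [pvAssign]
  | cons t ts ih => simp only [List.cons_append, pvAssign]; split <;> simp [ih]

lemma pvAssign_snoc (ws m : List (List Char)) (a b : List Char) (hb : b ≠ [])
    (hl : ws.length = (m.filter (· ≠ [])).length) :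
    pvAssign (ws ++ [a]) (m ++ [b]) = pvAssign ws m ++ [a] := by
  induction m generalizing ws with
  | nil =>
    simp only [List.filter_nil, List.length_nil] at hl
    rcases List.eq_nil_of_length_eq_zero hl with rfl
    simp [pvAssign, hb]
  | cons t ts ih =>
    simp only [List.cons_append, pvAssign]
    by_cases ht : t = []
    · simp only [ht, if_true]
      rw [ih ws (by simpa [ht] using hl)]; simp
    · simp only [ht, if_false]
      cases ws with
      | nil => simp [ht] at hl
      | cons w ws' =>
        simp only [List.filter_cons] at hl
        rw [List.cons_append, List.headD_cons]
        simp only [List.tail_cons, List.headD_cons]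
        rw [ih ws' (by simpa [ht] using hl)]
        simp

lemma pvRevNE_nil : pvRevNE [] = [] := by simp [pvRevNE, pvAssign]

lemma pvRevNE_single (t : List Char) : pvRevNE [t] = [t] := by
  by_cases h : t = [] <;> simp [pvRevNE, pvAssign, h]

lemma pvRevNE_cons_nil (m : List (List Char)) : pvRevNE ([] :: m) = [] :: pvRevNE m := by
  simp [pvRevNE, pvAssign]

lemma pvRevNE_snoc_nil (m : List (List Char)) : pvRevNE (m ++ [[]]) = pvRevNE m ++ [[]] := by
  simp only [pvRevNE, List.filter_append, List.filter_cons]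
  simp [pvAssign_snoc_nil]

lemma pvRevNE_cons_snoc (m : List (List Char)) (a b : List Char) (ha : a ≠ []) (hb : b ≠ []) :
    pvRevNE (a :: m ++ [b]) = b :: pvRevNE m ++ [a] := by
  simp only [pvRevNE, List.cons_append, List.filter_cons, List.filter_append, ha, hb,
    decide_true, ne_eq, not_false_iff, if_true]
  simp only [List.reverse_cons, List.reverse_append, List.reverse_cons,
    List.nil_append, List.cons_append, List.append_assoc]
  simp only [List.filter_nil, List.reverse_nil, List.nil_append, List.headD_cons, List.tail_cons,
    pvAssign, ha, if_false]
  rw [pvAssign_snoc ((m.filter (· ≠ [])).reverse) m a b hb (by simp)]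

lemma pvRevNE_length (m : List (List Char)) : (pvRevNE m).length = m.length := by
  simp [pvRevNE, pvAssign_length]

lemma pvRevNE_mem (m : List (List Char)) (t : List Char) (h : t ∈ pvRevNE m) :
    t = [] ∨ t ∈ m := by
  rcases pvAssign_mem _ _ _ h with h' | h'
  · exact Or.inl h'
  · exact Or.inr (List.mem_filter.1 (List.mem_reverse.1 h')).1

lemma pvGetD_mid (l₀ l₁ : List (List Char)) (c : List Char) (rest : List (List Char)) :
    (l₀ ++ (c :: rest) ++ l₁).getD l₀.length [] = c := by
  simp [List.getD_eq_getElem?_getD, List.append_assoc]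

lemma pvSet_mid (l₀ l₁ : List (List Char)) (c v : List Char) (rest : List (List Char)) :
    (l₀ ++ (c :: rest) ++ l₁).set l₀.length v = l₀ ++ (v :: rest) ++ l₁ := by
  rw [List.append_assoc, List.set_append_right _ _ (Nat.le_refl _)]
  simp [List.append_assoc]

lemma pvSwap_seg (n : Nat) : ∀ (seg l₀ l₁ : List (List Char)), seg.length ≤ n →
    pvSwapLoop (l₀ ++ seg ++ l₁) l₀.length (l₀.length + seg.length - 1) =
      l₀ ++ pvRevNE seg ++ l₁ := by
  induction n with
  | zero =>
    intro seg l₀ l₁ hn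
    rcases List.eq_nil_of_length_eq_zero (Nat.le_zero.1 hn) with rfl
    rw [pvSwapLoop]; rw [if_neg (by simp only [List.length_nil]; omega)]; simp [pvRevNE_nil]
  | succ n ih =>
    intro seg l₀ l₁ hn
    rcases seg with _ | ⟨a, rest⟩
    · rw [pvSwapLoop]; rw [if_neg (by simp only [List.length_nil]; omega)]; simp [pvRevNE_nil]
    rcases rest.eq_nil_or_concat with rfl | ⟨r', d, rfl⟩
    · rw [pvSwapLoop]; rw [if_neg (by simp)]; simp [pvRevNE_single]
    simp only [List.concat_eq_append]
    have hlen : (a :: (r' ++ [d])).length = r'.length + 2 := by simp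
    have he : l₀.length + (a :: (r' ++ [d])).length - 1 = l₀.length + r'.length + 1 := by
      simp; omega
    rw [pvSwapLoop]
    rw [he, if_pos (by omega)]
    rw [pvGetD_mid l₀ l₁ a (r' ++ [d])]
    by_cases ha : a = []
    · rw [if_pos ha]
      have h1 : l₀ ++ (a :: (r' ++ [d])) ++ l₁ = (l₀ ++ [[]]) ++ (r' ++ [d]) ++ l₁ := by
        simp [ha]
      have h2 : l₀.length + 1 = (l₀ ++ [[]]).length := by simp
      have h3 : l₀.length + r'.length + 1 =
          (l₀ ++ [[]]).length + (r' ++ [d]).length - 1 := by simp; omega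
      rw [h1, h2, h3, ih (r' ++ [d]) (l₀ ++ [[]]) l₁ (by simp at hn ⊢; omega)]
      rw [ha, pvRevNE_cons_nil]
      simp
    · rw [if_neg ha]
      have hgd : (l₀ ++ (a :: (r' ++ [d])) ++ l₁).getD (l₀.length + r'.length + 1) [] = d := by
        have heq : l₀ ++ (a :: (r' ++ [d])) ++ l₁ = (l₀ ++ a :: r') ++ ([d] ++ l₁) := by simp
        have hL : l₀.length + r'.length + 1 = (l₀ ++ a :: r').length := by simp; omega
        rw [heq, hL, ← List.append_assoc]
        exact pvGetD_mid (l₀ ++ a :: r') l₁ d []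
      rw [hgd]
      by_cases hd : d = []
      · rw [if_pos hd]
        have h1 : l₀ ++ (a :: (r' ++ [d])) ++ l₁ = l₀ ++ (a :: r') ++ ([[]] ++ l₁) := by
          simp [hd]
        have h2 : l₀.length + r'.length + 1 - 1 = l₀.length + (a :: r').length - 1 := by
          simp
        rw [h1, h2, ih (a :: r') l₀ ([[]] ++ l₁) (by simp at hn ⊢; omega)]
        have h3 : a :: (r' ++ [d]) = (a :: r') ++ [[]] := by simp [hd]
        rw [h3, pvRevNE_snoc_nil]
        simp
      · rw [if_neg hd]
        have hset : ((l₀ ++ (a :: (r' ++ [d])) ++ l₁).set l₀.length d).set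
            (l₀.length + r'.length + 1) a = (l₀ ++ [d]) ++ r' ++ ([a] ++ l₁) := by
          rw [pvSet_mid l₀ l₁ a d (r' ++ [d])]
          have heq : l₀ ++ (d :: (r' ++ [d])) ++ l₁ = (l₀ ++ d :: r') ++ ([d] ++ l₁) := by simp
          have hL : l₀.length + r'.length + 1 = (l₀ ++ d :: r').length := by simp; omega
          rw [heq, hL, ← List.append_assoc, pvSet_mid (l₀ ++ d :: r') l₁ d a []]
          simp
        rw [hset]
        have h2 : l₀.length + 1 = (l₀ ++ [d]).length := by simp
        have h3 : l₀.length + r'.length + 1 - 1 = (l₀ ++ [d]).length + r'.length - 1 := by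
          simp
        rw [h2, h3, ih r' (l₀ ++ [d]) ([a] ++ l₁) (by simp at hn ⊢; omega)]
        have h4 : a :: (r' ++ [d]) = a :: r' ++ [d] := by simp
        rw [h4, pvRevNE_cons_snoc r' a d ha hd]
        simp

lemma pvAReplace_skip (ds t cs : List Char) (i : Nat) (h : ' ' ∉ t) :
    pvAReplace ds (t ++ cs) i = t ++ pvAReplace ds cs i := by
  induction t with
  | nil => simp
  | cons c t ih =>
    have hc : ¬ c = ' ' := fun hc => h (hc ▸ List.mem_cons_self)
    simp only [List.cons_append, pvAReplace, hc, if_false]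
    rw [ih (fun hm => h (List.mem_cons_of_mem _ hm))]

lemma pvInterZ_nil_right (ds : List Char) : pvInterZ ds [] = [] := by
  cases ds <;> rfl

lemma pvReplJoin (ts : List (List Char)) (ds : List Char) (i : Nat)
    (hsp : ∀ t ∈ ts, ' ' ∉ t) (hlen : ds.length + 1 = i + ts.length) :
    pvAReplace ds (PySem.Chars.join [' '] ts) i = ts.headD [] ++ pvInterZ (ds.drop i) ts.tail := by
  induction ts generalizing i with
  | nil => simp [PySem.Chars.join_nil, pvAReplace, pvInterZ_nil_right]
  | cons t ts ih =>
    cases ts with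
    | nil =>
      rw [PySem.Chars.join_singleton]
      have := pvAReplace_skip ds t [] i (hsp t List.mem_cons_self)
      simp only [List.append_nil] at this
      rw [this]
      simp [pvAReplace, pvInterZ_nil_right]
    | cons t' ts' =>
      rw [PySem.Chars.join_cons_cons]
      have hi : i < ds.length := by simp at hlen; omega
      rw [List.append_assoc, pvAReplace_skip ds t _ i (hsp t List.mem_cons_self)]
      have hsp' : ∀ u ∈ t' :: ts', ' ' ∉ u := fun u hu => hsp u (List.mem_cons_of_mem _ hu)
      have hstep : pvAReplace ds (' ' :: PySem.Chars.join [' '] (t' :: ts')) i =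
          ds.getD i ' ' :: pvAReplace ds (PySem.Chars.join [' '] (t' :: ts')) (i + 1) := by
        simp [pvAReplace]
      have hcons : [' '] ++ PySem.Chars.join [' '] (t' :: ts') =
          ' ' :: PySem.Chars.join [' '] (t' :: ts') := rfl
      rw [hcons, hstep, ih (i + 1) hsp' (by simp at hlen ⊢; omega)]
      rw [List.drop_eq_getElem_cons hi]
      simp only [List.headD_cons, List.tail_cons, pvInterZ]
      rw [List.getD_eq_getElem ds ' ' hi]

lemma pvFoldlZip (ds : List Char) (ts : List (List Char)) (init : List Char) :
    List.foldl (fun acc dt => acc ++ dt.1 :: dt.2) init (ds.zip ts) = init ++ pvInterZ ds ts := by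
  induction ds generalizing ts init with
  | nil => simp [pvInterZ]
  | cons d ds ih =>
    cases ts with
    | nil => simp [pvInterZ]
    | cons t ts => simp [pvInterZ, ih]

lemma pvMain (cs : List Char) (h : ' ' ∉ cs) :
    pvAReplace (List.foldl pvAScan ([], []) cs).1
      (PySem.Chars.join [' ']
        (pvSwapLoop (PySem.Chars.splitOn (List.foldl pvAScan ([], []) cs).2 [' ']) 0
          ((PySem.Chars.splitOn (List.foldl pvAScan ([], []) cs).2 [' ']).length - 1))) 0 =
    List.foldl (fun acc dt => acc ++ dt.1 :: dt.2)
      ((pvAssign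
          ((((List.foldl pvBTok ([], []) cs).1 ++ [(List.foldl pvBTok ([], []) cs).2]).filter
              (· ≠ [])).reverse)
          ((List.foldl pvBTok ([], []) cs).1 ++ [(List.foldl pvBTok ([], []) cs).2])).headD [])
      ((cs.filter pvDelim).zip
        ((pvAssign
          ((((List.foldl pvBTok ([], []) cs).1 ++ [(List.foldl pvBTok ([], []) cs).2]).filter
              (· ≠ [])).reverse)
          ((List.foldl pvBTok ([], []) cs).1 ++ [(List.foldl pvBTok ([], []) cs).2])).drop 1)) := by
  have htok := pvTok_eq cs [] []
  rw [List.nil_append, pvConsCur_nil _ (pvSplit_ne_nil _ _)] at htok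
  rw [pvScan_eq cs [] []]
  simp only [List.nil_append, htok]
  rw [pvSplitOn_eq, pvSplit_map_repl cs h]
  have hswap : pvSwapLoop (pvSplit pvDelim cs) 0 ((pvSplit pvDelim cs).length - 1) =
      pvRevNE (pvSplit pvDelim cs) := by
    have := pvSwap_seg (pvSplit pvDelim cs).length (pvSplit pvDelim cs) [] [] (Nat.le_refl _)
    simpa using this
  rw [hswap]
  have hslots : pvAssign (((pvSplit pvDelim cs).filter (· ≠ [])).reverse) (pvSplit pvDelim cs) =
      pvRevNE (pvSplit pvDelim cs) := rfl
  rw [hslots, pvFoldlZip]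
  have hsp : ∀ t ∈ pvRevNE (pvSplit pvDelim cs), ' ' ∉ t := by
    intro t ht hx
    rcases pvRevNE_mem _ _ ht with rfl | ht'
    · simp at hx
    · exact h (pvSplit_mem pvDelim cs t ht' ' ' hx)
  have hlen : (cs.filter pvDelim).length + 1 = 0 + (pvRevNE (pvSplit pvDelim cs)).length := by
    rw [pvRevNE_length, pvSplit_length]; omega
  rw [pvReplJoin _ _ 0 hsp hlen]
  simp [List.drop_one]

-- ===== VERDICT (by name: the statement is the Claim_ definition above) =====
theorem reverse_words_keeping_delimiters_spec : Claim_equal_reverse_words_keeping_delimiters := by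
  intro text _ hpre
  show reverse_words_keeping_delimiters text = reverse_words_keeping_delimiters_alt text
  exact congrArg String.ofList (pvMain text.toList hpre)
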